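-- pv_equiv track=rewrite | github.com/cma1114/self_awareness | metacog/parse_logres_sc_dump_all_cmp.py | break_subject_name
-- ===== SOURCE A (Python) =====
-- def break_subject_name(name, max_parts_per_line=3):
--     """Breaks a subject name string by hyphens for better display."""
--     parts = name.split('-')
--     if len(parts) <= max_parts_per_line:
--         return name
--
--     wrapped_name = ""
--     for i, part in enumerate(parts):
--         wrapped_name += part
--         if (i + 1) % max_parts_per_line == 0 and (i + 1) < len(parts):
--             wrapped_name += "-\n"
--         elif (i + 1) < len(parts):
--             wrapped_name += "-"
--     return wrapped_name
-- ===== SOURCE B (Python) =====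
-- def break_subject_name(name, max_parts_per_line=3):
--     """Breaks a subject name string by hyphens for better display."""
--     parts = name.split('-')
--     groups = ['-'.join(parts[i:i + max_parts_per_line])
--               for i in range(0, len(parts), max_parts_per_line)]
--     return '-\n'.join(groups)
-- ===== Notes on version B (the rewrite author's own statement) =====
-- stated objective: idiomatic
-- what changed: A accumulates characters in one indexed loop choosing each separator by an (i+1) % max modulus test plus an early-return guard; B has no loop state and no guard: it slices the hyphen-split parts into consecutive groups of max_parts_per_line, joins each group with a hyphen and joins the groups with hyphen+newline.
-- outside the precondition, e.g. on break_subject_name('a-b-c-d', -2): A returns 'a-b-\nc-d', B returns ''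
import Mathlib
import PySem

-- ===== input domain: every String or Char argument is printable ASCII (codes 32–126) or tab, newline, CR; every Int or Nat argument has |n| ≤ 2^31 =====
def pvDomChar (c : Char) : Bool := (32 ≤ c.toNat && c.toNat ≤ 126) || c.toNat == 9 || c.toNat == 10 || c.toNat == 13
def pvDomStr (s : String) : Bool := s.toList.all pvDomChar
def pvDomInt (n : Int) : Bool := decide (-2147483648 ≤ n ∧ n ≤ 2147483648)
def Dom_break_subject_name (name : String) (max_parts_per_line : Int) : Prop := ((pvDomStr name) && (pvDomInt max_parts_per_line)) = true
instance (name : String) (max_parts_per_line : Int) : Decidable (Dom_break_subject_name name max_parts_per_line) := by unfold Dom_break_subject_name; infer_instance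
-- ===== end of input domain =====

-- B replaces A's index-wise loop (separator chosen by a modulus test at each part) by slicing the
-- hyphen-split parts into consecutive groups, joining each group with a hyphen and the groups with
-- hyphen+newline; objective: idiomatic. No mutation.

-- ===== PORT A =====
def break_subject_name (name : String) (max_parts_per_line : Int) : String :=
  let parts := PySem.Chars.splitOn name.toList ['-']
  if (parts.length : Int) ≤ max_parts_per_line then name
  else
    String.ofList <|
      (PySem.List.enumerate parts 0).foldl (fun wrapped ip =>
        let wrapped := wrapped ++ ip.2
        if PySem.Int.mod (ip.1 + 1) max_parts_per_line = 0 ∧ ip.1 + 1 < (parts.length : Int) then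
          wrapped ++ ['-', '\n']
        else if ip.1 + 1 < (parts.length : Int) then
          wrapped ++ ['-']
        else wrapped) []

-- ===== PORT B =====
def break_subject_name_alt (name : String) (max_parts_per_line : Int) : String :=
  let parts := PySem.Chars.splitOn name.toList ['-']
  let groups := (PySem.List.pyRange 0 (parts.length : Int) max_parts_per_line).map
    (fun i => PySem.Chars.join ['-'] (PySem.List.slice parts (some i) (some (i + max_parts_per_line))))
  String.ofList (PySem.Chars.join ['-', '\n'] groups)

-- ===== PRECONDITION & SPEC =====
-- Pre_ excludes max_parts_per_line = 0, where A raises ZeroDivisionError, and the degenerate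
-- max_parts_per_line < 0 outside the natural domain of a per-line count, where A's returned value
-- (grouping by the absolute value, an accident of Python's sign-of-divisor modulus) is not one B mimics.
def Pre_break_subject_name (name : String) (max_parts_per_line : Int) : Prop :=
  1 ≤ max_parts_per_line
instance (name : String) (max_parts_per_line : Int) : Decidable (Pre_break_subject_name name max_parts_per_line) := by unfold Pre_break_subject_name; infer_instance

def pvWitness_break_subject_name : String × Int := ("a-b-c-d", 2)

def Spec_break_subject_name (name : String) (max_parts_per_line : Int) (out : String) : Prop := out = break_subject_name_alt name max_parts_per_line
instance (name : String) (max_parts_per_line : Int) (out : String) : Decidable (Spec_break_subject_name name max_parts_per_line out) := by unfold Spec_break_subject_name; infer_instance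

-- ===== CLAIM (what is proved, stated in full; the proofs are below) =====
def Claim_equal_break_subject_name : Prop := ∀ (name : String) (max_parts_per_line : Int), Dom_break_subject_name name max_parts_per_line → Pre_break_subject_name name max_parts_per_line → Spec_break_subject_name name max_parts_per_line (break_subject_name name max_parts_per_line)

-- ===== LEMMAS AND PROOFS =====

-- chunks of size (max m 1), the proof-side description shared by both ports
def pvChunks (m : Nat) (l : List (List Char)) : List (List (List Char)) :=
  if _h : l = [] then [] else l.take (max m 1) :: pvChunks m (l.drop (max m 1))
termination_by l.length
decreasing_by
  simp only [List.length_drop]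
  have : l.length ≠ 0 := by simpa [List.length_eq_zero_iff] using _h
  omega

theorem pvChunks_nil (m : Nat) : pvChunks m [] = [] := by simp [pvChunks]

theorem pvChunks_of_ne_nil (m : Nat) (l : List (List Char)) (h : l ≠ []) :
    pvChunks m l = l.take (max m 1) :: pvChunks m (l.drop (max m 1)) := by
  rw [pvChunks]; simp [h]

-- joining with one more split piece
theorem join_append_pair (sep : List Char) (xs : List (List Char)) (a b : List Char) :
    PySem.Chars.join sep (xs ++ [a, b]) = PySem.Chars.join sep (xs ++ [a ++ sep ++ b]) := by
  induction xs with
  | nil => simp [PySem.Chars.join_cons_cons, PySem.Chars.join_singleton]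
  | cons x xs ih =>
    cases xs with
    | nil => simp [PySem.Chars.join_cons_cons, PySem.Chars.join_singleton, List.append_assoc]
    | cons y ys =>
      simp only [List.cons_append, PySem.Chars.join_cons_cons] at *
      simp [ih]

-- s.split(sep) re-joined with sep is s (fuel-indexed invariant of splitOn.go)
theorem join_go (sep : List Char) (hsep : sep ≠ []) :
    ∀ (fuel : Nat) (l cur : List Char) (acc : List (List Char)), l.length < fuel →
      PySem.Chars.join sep (PySem.Chars.splitOn.go sep fuel l cur acc) =
        PySem.Chars.join sep (acc.reverse ++ [cur.reverse ++ l]) := by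
  intro fuel
  induction fuel with
  | zero => intro l cur acc h; omega
  | succ n ih =>
    intro l cur acc h
    cases l with
    | nil => simp [PySem.Chars.splitOn.go]
    | cons c rest =>
      rw [PySem.Chars.splitOn.go]
      by_cases hp : sep.isPrefixOf (c :: rest) = true
      · rw [if_pos hp]
        have hpre := List.isPrefixOf_iff_prefix.mp hp
        have hslen : 1 ≤ sep.length := by cases sep <;> simp_all
        rw [ih _ _ _ (by simp only [List.length_drop, List.length_cons]; simp at h; omega)]
        obtain ⟨t, ht⟩ := hpre
        have hdrop : (c :: rest).drop sep.length = t := by rw [← ht]; simp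
        calc PySem.Chars.join sep ((cur.reverse :: acc).reverse ++ [[] ++ (c :: rest).drop sep.length])
            = PySem.Chars.join sep (acc.reverse ++ [cur.reverse, (c :: rest).drop sep.length]) := by
              simp
          _ = PySem.Chars.join sep (acc.reverse ++ [cur.reverse ++ sep ++ (c :: rest).drop sep.length]) := by
              rw [join_append_pair]
          _ = PySem.Chars.join sep (acc.reverse ++ [cur.reverse ++ (c :: rest)]) := by
              rw [hdrop, List.append_assoc, ht]
      · rw [if_neg hp]
        rw [ih _ _ _ (by simp at h ⊢; omega)]
        simp

theorem join_splitOn (s : List Char) :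
    PySem.Chars.join ['-'] (PySem.Chars.splitOn s ['-']) = s := by
  unfold PySem.Chars.splitOn
  rw [join_go ['-'] (by simp) _ _ _ _ (by omega)]
  simp [PySem.Chars.join_singleton]

theorem go_ne_nil (sep : List Char) :
    ∀ (fuel : Nat) (l cur : List Char) (acc : List (List Char)),
      PySem.Chars.splitOn.go sep fuel l cur acc ≠ [] := by
  intro fuel
  induction fuel with
  | zero => intro l cur acc; simp [PySem.Chars.splitOn.go]
  | succ n ih =>
    intro l cur acc
    cases l with
    | nil => simp [PySem.Chars.splitOn.go]
    | cons c rest =>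
      rw [PySem.Chars.splitOn.go]
      by_cases hp : sep.isPrefixOf (c :: rest) = true
      · rw [if_pos hp]; exact ih _ _ _
      · rw [if_neg hp]; exact ih _ _ _

theorem splitOn_ne_nil (s : List Char) : PySem.Chars.splitOn s ['-'] ≠ [] :=
  go_ne_nil _ _ _ _ _

-- pyRange with positive step, one step at a time
theorem pyRange_pos_cons (a b m : Int) (hm : 0 < m) (h : a < b) :
    PySem.List.pyRange a b m = a :: PySem.List.pyRange (a + m) b m := by
  rw [PySem.List.pyRange_of_pos _ _ hm, PySem.List.pyRange_of_pos _ _ hm]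
  simp only [h, if_true]
  by_cases h2 : a + m < b
  · simp only [h2, if_true]
    have hq : (b - a + m - 1) / m = (b - (a + m) + m - 1) / m + 1 := by
      rw [show b - a + m - 1 = (b - (a + m) + m - 1) + 1 * m by ring,
        Int.add_mul_ediv_right _ _ hm.ne']
    have hnn : 0 ≤ (b - (a + m) + m - 1) / m := Int.ediv_nonneg (by omega) hm.le
    rw [hq, Int.toNat_add hnn (by omega)]
    simp only [Int.toNat_one]
    rw [List.range_succ_eq_map]
    simp only [List.map_cons, List.map_map, Nat.cast_zero, mul_zero, add_zero, List.cons.injEq]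
    refine ⟨trivial, List.map_congr_left fun k _ => ?_⟩
    simp [Function.comp]; ring
  · simp only [h2, if_false]
    have h0 : (b - a - 1) / m = 0 := Int.ediv_eq_zero_of_lt (by omega) (by omega)
    rw [show b - a + m - 1 = (b - a - 1) + 1 * m by ring,
      Int.add_mul_ediv_right _ _ hm.ne', h0]
    simp [List.range_succ]

theorem pyRange_pos_nil (a b m : Int) (hm : 0 < m) (h : b ≤ a) :
    PySem.List.pyRange a b m = [] := by
  rw [PySem.List.pyRange_of_pos _ _ hm]
  simp [not_lt.mpr h]

-- ===== B-side characterisation =====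
theorem B_groups (parts : List (List Char)) (mt : Nat) (hm : 1 ≤ mt) :
    ∀ (j : Nat), j ≤ parts.length →
      ((PySem.List.pyRange (j : Int) (parts.length : Int) (mt : Int)).map
        (fun i => PySem.Chars.join ['-'] (PySem.List.slice parts (some i) (some (i + (mt : Int)))))) =
      (pvChunks mt (parts.drop j)).map (PySem.Chars.join ['-']) := by
  intro j hj
  induction hn : parts.length - j using Nat.strong_induction_on generalizing j with
  | _ k ih =>
  by_cases hlt : j < parts.length
  · rw [pyRange_pos_cons _ _ _ (by exact_mod_cast hm) (by exact_mod_cast hlt)]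
    have hmax : max mt 1 = mt := by omega
    have hdropne : parts.drop j ≠ [] := by
      simp [List.drop_eq_nil_iff]; omega
    rw [pvChunks_of_ne_nil _ _ hdropne, hmax]
    simp only [List.map_cons]
    rw [PySem.List.slice_natCast_add parts j mt]
    congr 1
    have hcast : (j : Int) + (mt : Int) = ((j + mt : Nat) : Int) := by push_cast; ring
    by_cases h2 : j + mt ≤ parts.length
    · rw [hcast, ih (parts.length - (j + mt)) (by omega) (j + mt) h2 rfl]
      simp [List.drop_drop, Nat.add_comm]
    · rw [hcast, pyRange_pos_nil _ _ _ (by exact_mod_cast hm)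
        (by exact_mod_cast (by omega : parts.length ≤ j + mt))]
      have hnil : (parts.drop j).drop mt = [] := by
        simp [List.drop_drop, List.drop_eq_nil_iff]; omega
      rw [hnil, pvChunks_nil]
      simp
  · have hj' : j = parts.length := by omega
    rw [pyRange_pos_nil _ _ _ (by exact_mod_cast hm) (by exact_mod_cast le_of_eq hj'.symm)]
    rw [hj']
    simp [pvChunks_nil]

-- ===== A-side: the loop body as a named function (definitionally the port's lambda) =====
def pvStep (n : Int) (m : Int) (wrapped : List Char) (ip : Int × List Char) : List Char :=
  let wrapped := wrapped ++ ip.2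
  if PySem.Int.mod (ip.1 + 1) m = 0 ∧ ip.1 + 1 < n then wrapped ++ ['-', '\n']
  else if ip.1 + 1 < n then wrapped ++ ['-']
  else wrapped

-- in mid-chunk position the modulus test fails
theorem pvMod_ne (mt base r : Nat) (hdvd : mt ∣ base) (hr : r + 1 < mt) :
    PySem.Int.mod (((base + r : Nat) : Int) + 1) ((mt : Nat) : Int) ≠ 0 := by
  intro hd
  rw [PySem.Int.mod_eq_zero_iff_dvd,
    show ((base + r : Nat) : Int) + 1 = ((base + r + 1 : Nat) : Int) by push_cast; ring,
    Int.natCast_dvd_natCast] at hd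
  have h1 : mt ∣ r + 1 := (Nat.dvd_add_right hdvd).mp (by rwa [Nat.add_assoc] at hd)
  exact absurd (Nat.le_of_dvd (by omega) h1) (by omega)

-- a final (short or full) chunk: every element but the global last gets '-', the last nothing
theorem A_last_chunk (n mt : Nat) :
    ∀ (chunk : List (List Char)) (r base : Nat) (acc : List Char),
      mt ∣ base → base + r + chunk.length = n → r + chunk.length ≤ mt → chunk ≠ [] →
      (PySem.List.enumerate chunk ((base + r : Nat) : Int)).foldl (pvStep (n : Int) (mt : Int)) acc =
        acc ++ PySem.Chars.join ['-'] chunk := by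
  intro chunk
  induction chunk with
  | nil => intro r base acc _ _ _ h; exact absurd rfl h
  | cons p tl ih =>
    intro r base acc hdvd hn hle hne
    rw [PySem.List.enumerate_cons, List.foldl_cons]
    cases tl with
    | nil =>
      simp only [List.length_cons, List.length_nil] at hn
      have hge : ¬ (((base + r : Nat) : Int) + 1 < (n : Int)) := by push_cast; omega
      have hstep : pvStep (n : Int) (mt : Int) acc (((base + r : Nat) : Int), p) = acc ++ p := by
        simp only [pvStep]
        rw [if_neg (fun hc => hge hc.2), if_neg hge]
      rw [hstep, PySem.List.enumerate_nil, List.foldl_nil, PySem.Chars.join_singleton]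
    | cons q ts =>
      have hlt : ((base + r : Nat) : Int) + 1 < (n : Int) := by
        simp only [List.length_cons] at hn; push_cast; omega
      have hmod := pvMod_ne mt base r hdvd (by simp only [List.length_cons] at hle; omega)
      have hstep : pvStep (n : Int) (mt : Int) acc (((base + r : Nat) : Int), p) =
          acc ++ p ++ ['-'] := by
        simp only [pvStep]
        rw [if_neg (fun hc => hmod hc.1), if_pos hlt]
      rw [hstep,
        show ((base + r : Nat) : Int) + 1 = ((base + (r + 1) : Nat) : Int) by push_cast; ring,
        ih (r + 1) base (acc ++ p ++ ['-']) hdvd (by simp at hn ⊢; omega)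
          (by simp at hle ⊢; omega) (by simp)]
      rw [PySem.Chars.join_cons_cons]
      simp [List.append_assoc]

-- a full chunk with more parts after it: ends in '-\n'
theorem A_full_chunk (n mt : Nat) :
    ∀ (chunk : List (List Char)) (r base : Nat) (acc : List Char),
      mt ∣ base → r + chunk.length = mt → base + mt < n → chunk ≠ [] →
      (PySem.List.enumerate chunk ((base + r : Nat) : Int)).foldl (pvStep (n : Int) (mt : Int)) acc =
        acc ++ PySem.Chars.join ['-'] chunk ++ ['-', '\n'] := by
  intro chunk
  induction chunk with
  | nil => intro r base acc _ _ _ h; exact absurd rfl h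
  | cons p tl ih =>
    intro r base acc hdvd hr hbig hne
    rw [PySem.List.enumerate_cons, List.foldl_cons]
    cases tl with
    | nil =>
      simp only [List.length_cons, List.length_nil] at hr
      have hmod : PySem.Int.mod (((base + r : Nat) : Int) + 1) ((mt : Nat) : Int) = 0 := by
        rw [PySem.Int.mod_eq_zero_iff_dvd,
          show ((base + r : Nat) : Int) + 1 = ((base + r + 1 : Nat) : Int) by push_cast; ring,
          Int.natCast_dvd_natCast,
          show base + r + 1 = base + mt by omega]
        exact Nat.dvd_add hdvd dvd_rfl
      have hlt : ((base + r : Nat) : Int) + 1 < (n : Int) := by push_cast; omega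
      have hstep : pvStep (n : Int) (mt : Int) acc (((base + r : Nat) : Int), p) =
          acc ++ p ++ ['-', '\n'] := by
        simp only [pvStep]
        rw [if_pos ⟨hmod, hlt⟩]
      rw [hstep, PySem.List.enumerate_nil, List.foldl_nil, PySem.Chars.join_singleton]
    | cons q ts =>
      have hlt : ((base + r : Nat) : Int) + 1 < (n : Int) := by
        simp only [List.length_cons] at hr; push_cast; omega
      have hmod := pvMod_ne mt base r hdvd (by simp only [List.length_cons] at hr; omega)
      have hstep : pvStep (n : Int) (mt : Int) acc (((base + r : Nat) : Int), p) =
          acc ++ p ++ ['-'] := by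
        simp only [pvStep]
        rw [if_neg (fun hc => hmod hc.1), if_pos hlt]
      rw [hstep,
        show ((base + r : Nat) : Int) + 1 = ((base + (r + 1) : Nat) : Int) by push_cast; ring,
        ih (r + 1) base (acc ++ p ++ ['-']) hdvd (by simp at hr ⊢; omega) hbig (by simp)]
      rw [PySem.Chars.join_cons_cons]
      simp [List.append_assoc]

-- the whole loop: A's fold produces the '-\n'-joined chunk rendering
theorem A_loop (n mt : Nat) (hm : 1 ≤ mt) :
    ∀ (rest : List (List Char)) (j : Nat) (acc : List Char),
      mt ∣ j → j + rest.length = n → rest ≠ [] →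
      (PySem.List.enumerate rest ((j : Nat) : Int)).foldl (pvStep (n : Int) (mt : Int)) acc =
        acc ++ PySem.Chars.join ['-', '\n'] ((pvChunks mt rest).map (PySem.Chars.join ['-'])) := by
  intro rest
  induction hk : rest.length using Nat.strong_induction_on generalizing rest with
  | _ k ih =>
  intro j acc hdvd hn hne
  subst hk
  by_cases hshort : rest.length ≤ mt
  · rw [pvChunks_of_ne_nil _ _ hne]
    have hmax : max mt 1 = mt := by omega
    rw [hmax, List.take_of_length_le hshort, List.drop_eq_nil_of_le hshort, pvChunks_nil]
    simp only [List.map_cons, List.map_nil, PySem.Chars.join_singleton]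
    have := A_last_chunk n mt rest 0 j acc hdvd (by omega) (by omega) hne
    simpa using this
  · have hlong : mt < rest.length := by omega
    have hsplit : rest = rest.take mt ++ rest.drop mt := (List.take_append_drop mt rest).symm
    rw [pvChunks_of_ne_nil _ _ hne]
    have hmax : max mt 1 = mt := by omega
    rw [hmax]
    conv_lhs => rw [hsplit]
    rw [PySem.List.enumerate_append, List.foldl_append]
    have htlen : (rest.take mt).length = mt := by simp; omega
    rw [show ((j : Nat) : Int) = ((j + 0 : Nat) : Int) by simp] at *
    rw [A_full_chunk n mt (rest.take mt) 0 j acc hdvd (by omega) (by omega)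
      (by intro h; rw [h] at htlen; simp at htlen; omega)]
    have hjm : ((j + 0 : Nat) : Int) + ((rest.take mt).length : Int) = ((j + mt : Nat) : Int) := by
      rw [htlen]; push_cast; ring
    rw [hjm, ih (rest.drop mt).length (by simp; omega) (rest.drop mt) rfl (j + mt)
      _ (Nat.dvd_add hdvd dvd_rfl) (by simp; omega) (by simp [List.drop_eq_nil_iff]; omega)]
    have hchne : pvChunks mt (rest.drop mt) ≠ [] := by
      rw [pvChunks_of_ne_nil _ _ (by simp [List.drop_eq_nil_iff]; omega)]; simp
    obtain ⟨c, cs, hcs⟩ := List.exists_cons_of_ne_nil hchne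
    rw [hcs]
    simp only [List.map_cons, PySem.Chars.join_cons_cons]
    simp [List.append_assoc]

-- ===== VERDICT (by name: the statement is the Claim_ definition above) =====
theorem break_subject_name_spec : Claim_equal_break_subject_name := by
  intro name m _hdom hpre
  unfold Spec_break_subject_name break_subject_name break_subject_name_alt
  set parts := PySem.Chars.splitOn name.toList ['-'] with hparts
  have hne : parts ≠ [] := splitOn_ne_nil _
  have hm1 : (1 : Int) ≤ m := hpre
  have hmt : m = ((m.toNat : Nat) : Int) := by omega
  have hmt1 : 1 ≤ m.toNat := by omega
  have hB : (PySem.List.pyRange 0 (parts.length : Int) m).map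
      (fun i => PySem.Chars.join ['-'] (PySem.List.slice parts (some i) (some (i + m)))) =
      (pvChunks m.toNat parts).map (PySem.Chars.join ['-']) := by
    have h := B_groups parts m.toNat hmt1 0 (by omega)
    rw [List.drop_zero, show ((0 : Nat) : Int) = 0 from rfl, ← hmt] at h
    exact h
  by_cases hle : (parts.length : Int) ≤ m
  · simp only [hle, if_true]
    rw [hB]
    have hone : pvChunks m.toNat parts = [parts] := by
      rw [pvChunks_of_ne_nil _ _ hne]
      have hmax : max m.toNat 1 = m.toNat := by omega
      have hplen : parts.length ≤ m.toNat := by omega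
      rw [hmax, List.take_of_length_le hplen, List.drop_eq_nil_of_le hplen, pvChunks_nil]
    rw [hone]
    simp only [List.map_cons, List.map_nil, PySem.Chars.join_singleton]
    rw [join_splitOn]
    exact String.ofList_toList.symm
  · simp only [hle, if_false]
    rw [hB]
    have hfun : (fun (wrapped : List Char) (ip : Int × List Char) =>
        let wrapped := wrapped ++ ip.2
        if PySem.Int.mod (ip.1 + 1) m = 0 ∧ ip.1 + 1 < (parts.length : Int) then
          wrapped ++ ['-', '\n']
        else if ip.1 + 1 < (parts.length : Int) then
          wrapped ++ ['-']
        else wrapped) = pvStep (parts.length : Int) m := rfl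
    have hA := A_loop parts.length m.toNat hmt1 parts 0 [] (Nat.dvd_zero _) (by omega) hne
    rw [← hmt] at hA
    rw [show ((0 : Nat) : Int) = 0 from rfl, List.nil_append] at hA
    rw [hfun, hA]
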